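-- pv_equiv track=rewrite | github.com/minhtrung1997/bioturing-first-test-lib | trung_bftl/problem_functions.py | mortal_fibonacci
-- ===== SOURCE A (Python) =====
-- def mortal_fibonacci(n, m):
--     """
--     Computes the number of rabbit pairs after n months given that each pair of rabbits dies after m months.
--     Args:
--         n (int): The number of months to simulate.
--         m (int): The number of months each pair of rabbits lives.
--     Returns:
--         int: The number of rabbit pairs after n months.
--     """
--     rabbits = [1, 1]
--     for i in range(2,n): # start from 2 because we already know the first 2 months
--         if i < m: # if i is less than m, we add the last 2 months
--             rabbits.append(rabbits[-1] + rabbits[-2])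
--         elif i == m or i == m+1: # if i is equal to m or m+1, we add the last 2 months and subtract 1
--             rabbits.append(rabbits[-1] + rabbits[-2] - 1)
--         else: # if i is greater than m, we add the last 2 months and subtract the m-th month
--             rabbits.append(rabbits[-1] + rabbits[-2] - rabbits[-(m+1)])
--     return rabbits[-1].__int__()
-- ===== SOURCE B (Python) =====
-- def mortal_fibonacci(n, m):
--     if n <= 1:
--         return 1   # the initial pair, present from month 1
--     if m <= 0:
--         return 0   # nonpositive lifetime: nothing survives its first month
--     births = [1]   # births[t] = pairs born in month t+1; the living are the last m cohorts
--     alive = 1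
--     for t in range(1, n):
--         new = alive - births[-1]      # every pair at least one month old reproduces
--         births.append(new)
--         alive += new
--         if t >= m:
--             alive -= births[t - m]    # the cohort born m months ago dies this month
--     return alive
-- ===== Notes on version B (the rewrite author's own statement) =====
-- stated objective: alternative
-- what changed: B simulates the age-structured population directly - a ledger of monthly birth cohorts plus a running 'alive' total from which a cohort is removed when it reaches age m - instead of A's telescoped totals list with its three-phase lookback recurrence (i<m / i=m,m+1 / else) over rabbits[-1], rabbits[-2], rabbits[-(m+1)].
-- intended difference: For m <= 1 and n >= 2 (pairs that die after at most one month; also the degenerate m <= -3 with n = 2), A's fixed [1,1] seed makes it return 1 forever, while B returns 0 because the single pair has died - the intended count for a mortal population. — e.g. on mortal_fibonacci(2, 1): A returns 1, B returns 0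
-- crash fix: For m <= -3 and n >= 3, A raises IndexError (rabbits[-(m+1)] indexes past the list); B returns 0. — e.g. on mortal_fibonacci(3, -3): A raises IndexError, B returns 0
import Mathlib
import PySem

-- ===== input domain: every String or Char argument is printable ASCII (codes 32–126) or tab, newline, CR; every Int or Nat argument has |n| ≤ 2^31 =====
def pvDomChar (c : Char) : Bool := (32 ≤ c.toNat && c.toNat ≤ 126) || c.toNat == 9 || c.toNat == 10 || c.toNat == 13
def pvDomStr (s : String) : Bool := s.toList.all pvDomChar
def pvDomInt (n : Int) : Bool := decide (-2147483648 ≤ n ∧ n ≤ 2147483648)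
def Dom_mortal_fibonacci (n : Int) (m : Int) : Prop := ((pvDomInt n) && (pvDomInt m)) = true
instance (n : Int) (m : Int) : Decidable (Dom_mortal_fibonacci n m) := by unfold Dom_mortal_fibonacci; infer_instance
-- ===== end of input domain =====

-- B replaces A's telescoped Fibonacci-with-lookback recurrence by an age-structured population
-- vector (alternative decomposition; for m ≤ 1 with n ≥ 2, B returns the intended 0 where A's
-- fixed [1,1] seed returns 1 — see D_ below).


-- ===== PORT A =====
-- loop body of A (the three branches, literally); rabbits[-1], rabbits[-2], rabbits[-(m+1)]
-- are pyGetD with default 0 — the default is never read on inputs admitted by Pre_.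
def pvStepA (m : Int) (r : List Int) (i : Int) : List Int :=
  if i < m then
    r ++ [PySem.List.pyGetD r (-1) 0 + PySem.List.pyGetD r (-2) 0]
  else if i = m ∨ i = m + 1 then
    r ++ [PySem.List.pyGetD r (-1) 0 + PySem.List.pyGetD r (-2) 0 - 1]
  else
    r ++ [PySem.List.pyGetD r (-1) 0 + PySem.List.pyGetD r (-2) 0 - PySem.List.pyGetD r (-(m + 1)) 0]

def mortal_fibonacci (n : Int) (m : Int) : Int :=
  let rabbits : List Int := [1, 1]
  let rabbits := (PySem.List.pyRange 2 n 1).foldl (pvStepA m) rabbits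
  PySem.List.pyGetD rabbits (-1) 0

-- ===== PORT B =====
-- loop body of B over the state (births, alive); births[-1] and births[t-m] are pyGetD with
-- default 0 (never read: t ≥ m ≥ 1 puts t - m in range)
def pvStepB (m : Int) (st : List Int × Int) (t : Int) : List Int × Int :=
  let new := st.2 - PySem.List.pyGetD st.1 (-1) 0
  let births := st.1 ++ [new]
  let alive := st.2 + new
  if m ≤ t then (births, alive - PySem.List.pyGetD births (t - m) 0) else (births, alive)

def mortal_fibonacci_alt (n : Int) (m : Int) : Int :=
  if n ≤ 1 then 1
  else if m ≤ 0 then 0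
  else ((PySem.List.pyRange 1 n 1).foldl (pvStepB m) ([1], 1)).2

-- ===== PRECONDITION & SPEC =====
-- Pre_ excludes exactly the inputs on which Python A raises IndexError
-- (m ≤ -3 and n ≥ 3: rabbits[-(m+1)] indexes past the end of the list).
def Pre_mortal_fibonacci (n : Int) (m : Int) : Prop := -2 ≤ m ∨ n ≤ 2
instance (n : Int) (m : Int) : Decidable (Pre_mortal_fibonacci n m) := by
  unfold Pre_mortal_fibonacci; infer_instance
def pvWitness_mortal_fibonacci : Int × Int := (6, 3)

-- For m ≤ 1 and n ≥ 2 (pairs dying after at most one month, or the degenerate m ≤ -3 with n = 2),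
-- A's fixed [1,1] seed makes it return 1 forever, while B returns 0 because the single pair has
-- died — the intended count for a mortal population.
def D_mortal_fibonacci (n : Int) (m : Int) : Prop := m ≤ 1 ∧ 2 ≤ n
instance (n : Int) (m : Int) : Decidable (D_mortal_fibonacci n m) := by
  unfold D_mortal_fibonacci; infer_instance

def Spec_mortal_fibonacci (n : Int) (m : Int) (out : Int) : Prop :=
  ¬ D_mortal_fibonacci n m → out = mortal_fibonacci_alt n m
instance (n : Int) (m : Int) (out : Int) : Decidable (Spec_mortal_fibonacci n m out) := by
  unfold Spec_mortal_fibonacci; infer_instance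

def pvDiffWitness_mortal_fibonacci : Int × Int := (2, 1)
def pvDiffWitnessOut_mortal_fibonacci : Int × Int := (1, 0)

-- For m ≤ -3 and n ≥ 3, A raises IndexError (rabbits[-(m+1)] indexes past the list); B returns 0.
def Raises_mortal_fibonacci (n : Int) (m : Int) : Prop := m ≤ -3 ∧ 3 ≤ n
instance (n : Int) (m : Int) : Decidable (Raises_mortal_fibonacci n m) := by
  unfold Raises_mortal_fibonacci; infer_instance
def pvRaiseWitness_mortal_fibonacci : Int × Int := (3, -3)
def pvRaiseWitnessOut_mortal_fibonacci : Int := 0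

-- ===== CLAIM (what is proved, stated in full; the proofs are below) =====
def Claim_unchanged_mortal_fibonacci : Prop := ∀ (n : Int) (m : Int), Dom_mortal_fibonacci n m → Pre_mortal_fibonacci n m → Spec_mortal_fibonacci n m (mortal_fibonacci n m)
def Claim_changed_mortal_fibonacci : Prop := Dom_mortal_fibonacci (pvDiffWitness_mortal_fibonacci.1) (pvDiffWitness_mortal_fibonacci.2) ∧ Pre_mortal_fibonacci (pvDiffWitness_mortal_fibonacci.1) (pvDiffWitness_mortal_fibonacci.2) ∧ D_mortal_fibonacci (pvDiffWitness_mortal_fibonacci.1) (pvDiffWitness_mortal_fibonacci.2) ∧ mortal_fibonacci (pvDiffWitness_mortal_fibonacci.1) (pvDiffWitness_mortal_fibonacci.2) = pvDiffWitnessOut_mortal_fibonacci.1 ∧ mortal_fibonacci_alt (pvDiffWitness_mortal_fibonacci.1) (pvDiffWitness_mortal_fibonacci.2) = pvDiffWitnessOut_mortal_fibonacci.2 ∧ pvDiffWitnessOut_mortal_fibonacci.1 ≠ pvDiffWitnessOut_mortal_fibonacci.2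
def Claim_exact_mortal_fibonacci : Prop := ∀ (n : Int) (m : Int), Dom_mortal_fibonacci n m → Pre_mortal_fibonacci n m → D_mortal_fibonacci n m → mortal_fibonacci n m ≠ mortal_fibonacci_alt n m
def Claim_raises_mortal_fibonacci : Prop := (∀ (n : Int) (m : Int), Dom_mortal_fibonacci n m → Raises_mortal_fibonacci n m → ¬ Pre_mortal_fibonacci n m) ∧ (Dom_mortal_fibonacci (pvRaiseWitness_mortal_fibonacci.1) (pvRaiseWitness_mortal_fibonacci.2) ∧ Raises_mortal_fibonacci (pvRaiseWitness_mortal_fibonacci.1) (pvRaiseWitness_mortal_fibonacci.2) ∧ mortal_fibonacci_alt (pvRaiseWitness_mortal_fibonacci.1) (pvRaiseWitness_mortal_fibonacci.2) = pvRaiseWitnessOut_mortal_fibonacci)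

-- ===== LEMMAS AND PROOFS =====

-- (bfun m t, Tfun m t): births entering in month t and the total population in month t of the
-- age-structured model with lifetime m, as scalar recurrences.
def pvS (m : Nat) : Nat → Int × Int
  | 0 => (1, 1)
  | t + 1 =>
    let p := pvS m t
    let b' := p.2 - p.1
    (b', p.2 + b' - (if h : 0 < m ∧ m ≤ t + 1 then (pvS m (t + 1 - m)).1 else 0))
decreasing_by all_goals omega

def bfun (m t : Nat) : Int := (pvS m t).1
def Tfun (m t : Nat) : Int := (pvS m t).2

theorem bfun_succ (m t : Nat) : bfun m (t + 1) = Tfun m t - bfun m t := by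
  simp [bfun, Tfun, pvS]

theorem Tfun_succ (m t : Nat) :
    Tfun m (t + 1) = Tfun m t + bfun m (t + 1)
      - (if 0 < m ∧ m ≤ t + 1 then bfun m (t + 1 - m) else 0) := by
  rw [bfun_succ]
  simp [bfun, Tfun, pvS]

theorem Tfun_key (m t : Nat) :
    Tfun m (t + 2) = Tfun m (t + 1) + Tfun m t
      - (if 0 < m ∧ m ≤ t + 2 then bfun m (t + 2 - m) else 0)
      - (if 0 < m ∧ m ≤ t + 1 then bfun m (t + 1 - m) else 0) := by
  have h1 := Tfun_succ m (t + 1)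
  have h2 := Tfun_succ m t
  have h3 := bfun_succ m (t + 1)
  simp only [show t + 1 + 1 = t + 2 by omega] at h1 h3
  omega

-- A's loop computes the list [Tfun m 0, …, Tfun m (j-1)]
theorem A_loop (m : Nat) (hm : 2 ≤ m) (j : Nat) (hj : 2 ≤ j) :
    (PySem.List.pyRange 2 (j : Int) 1).foldl (pvStepA (m : Int)) [1, 1]
      = (List.range j).map (Tfun m) := by
  induction j, hj using Nat.le_induction with
  | base =>
      rw [PySem.List.pyRange_one_eq_nil (by norm_num)]
      have hb0 : bfun m 0 = 1 := by simp [bfun, pvS]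
      have hT0 : Tfun m 0 = 1 := by simp [Tfun, pvS]
      have hb1 := bfun_succ m 0
      have hT1 := Tfun_succ m 0
      rw [if_neg (by omega : ¬ (0 < m ∧ m ≤ 0 + 1))] at hT1
      simp only [Nat.zero_add] at hT1 hb1
      have : (List.range 2).map (Tfun m) = [Tfun m 0, Tfun m 1] := rfl
      rw [List.foldl_nil, this]
      have h1 : Tfun m 1 = 1 := by omega
      rw [hT0, h1]
  | succ j hj2 ih =>
      have hc : ((j + 1 : Nat) : Int) = (j : Int) + 1 := by push_cast; ring
      rw [hc, PySem.List.pyRange_one_succ_right (by omega : (2 : Int) ≤ (j : Int)),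
        List.foldl_append, List.foldl_cons, List.foldl_nil, ih,
        List.range_succ, List.map_append, List.map_cons, List.map_nil]
      obtain ⟨t, rfl⟩ : ∃ t, j = t + 2 := ⟨j - 2, by omega⟩
      set L := (List.range (t + 2)).map (Tfun m) with hL
      have hlen : L.length = t + 2 := by simp [hL]
      have hne : L ≠ [] := by
        intro h; rw [h] at hlen; simp at hlen
      have e1 : PySem.List.pyGetD L (-1) 0 = Tfun m (t + 1) := by
        rw [PySem.List.pyGetD_neg_one L 0 hne, List.getLast_eq_getElem]
        simp [hL]
      have e2 : PySem.List.pyGetD L (-2) 0 = Tfun m t := by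
        rw [PySem.List.pyGetD_neg_ofNat L 2 0 (by norm_num) (by omega)]
        simp [hL]
      have hkey := Tfun_key m t
      unfold pvStepA
      rw [e1, e2]
      split_ifs with h1 h2
      · -- i < m : plain Fibonacci step
        rw [if_neg (by omega : ¬ (0 < m ∧ m ≤ t + 2)),
          if_neg (by omega : ¬ (0 < m ∧ m ≤ t + 1))] at hkey
        simp only [List.append_right_inj, List.cons.injEq, and_true]
        omega
      · -- i = m or i = m + 1 : subtract 1
        have hb0 : bfun m 0 = 1 := by simp [bfun, pvS]
        have hT0 : Tfun m 0 = 1 := by simp [Tfun, pvS]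
        have hb1 := bfun_succ m 0
        simp only [Nat.zero_add] at hb1
        rcases h2 with h2 | h2
        · rw [if_pos (⟨by omega, by omega⟩ : 0 < m ∧ m ≤ t + 2),
            if_neg (by omega : ¬ (0 < m ∧ m ≤ t + 1))] at hkey
          rw [show t + 2 - m = 0 by omega] at hkey
          simp only [List.append_right_inj, List.cons.injEq, and_true]
          omega
        · rw [if_pos (⟨by omega, by omega⟩ : 0 < m ∧ m ≤ t + 2),
            if_pos (⟨by omega, by omega⟩ : 0 < m ∧ m ≤ t + 1)] at hkey
          rw [show t + 2 - m = 1 by omega, show t + 1 - m = 0 by omega] at hkey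
          simp only [List.append_right_inj, List.cons.injEq, and_true]
          omega
      · -- i ≥ m + 2 : subtract the pairs born m+1 months ago
        have e3 : PySem.List.pyGetD L (-((m : Int) + 1)) 0 = Tfun m (t + 1 - m) := by
          have hcast : (-((m : Int) + 1)) = -(((m + 1 : Nat) : Int)) := by push_cast; ring
          rw [hcast, PySem.List.pyGetD_neg_natCast L (m+1) 0 (by omega) (by omega)]
          simp only [hL, List.getElem_map, List.getElem_range, List.length_map,
            List.length_range]
          congr 1
          omega
        rw [e3]
        rw [if_pos (⟨by omega, by omega⟩ : 0 < m ∧ m ≤ t + 2),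
          if_pos (⟨by omega, by omega⟩ : 0 < m ∧ m ≤ t + 1)] at hkey
        have hbs := bfun_succ m (t + 1 - m)
        rw [show t + 1 - m + 1 = t + 2 - m by omega] at hbs
        simp only [List.append_right_inj, List.cons.injEq, and_true]
        omega

-- B's loop state after month j is the full births ledger and the living total Tfun m (j-1)
theorem B_loop (m : Nat) (hm : 1 ≤ m) (j : Nat) (hj : 1 ≤ j) :
    (PySem.List.pyRange 1 (j : Int) 1).foldl (pvStepB (m : Int)) ([1], 1)
      = ((List.range j).map (bfun m), Tfun m (j - 1)) := by
  induction j, hj using Nat.le_induction with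
  | base =>
      rw [PySem.List.pyRange_one_eq_nil (by norm_num)]
      have hb0 : bfun m 0 = 1 := by simp [bfun, pvS]
      have hT0 : Tfun m 0 = 1 := by simp [Tfun, pvS]
      simp [hb0, hT0, List.range_one]
  | succ j hj2 ih =>
      have hc : ((j + 1 : Nat) : Int) = (j : Int) + 1 := by push_cast; ring
      rw [hc, PySem.List.pyRange_one_succ_right (by omega : (1 : Int) ≤ (j : Int)),
        List.foldl_append, List.foldl_cons, List.foldl_nil, ih]
      unfold pvStepB
      have hne : (List.range j).map (bfun m) ≠ [] := by simp; omega
      have e1 : PySem.List.pyGetD ((List.range j).map (bfun m)) (-1) 0 = bfun m (j - 1) := by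
        rw [PySem.List.pyGetD_neg_one _ 0 hne, List.getLast_eq_getElem]
        simp
      dsimp only
      rw [e1]
      have hnew : Tfun m (j - 1) - bfun m (j - 1) = bfun m j := by
        have := bfun_succ m (j - 1)
        rw [show j - 1 + 1 = j by omega] at this
        omega
      have happ : (List.range j).map (bfun m) ++ [Tfun m (j - 1) - bfun m (j - 1)]
          = (List.range (j + 1)).map (bfun m) := by
        rw [hnew, List.range_succ, List.map_append, List.map_cons, List.map_nil]
      rw [happ]
      have hT := Tfun_succ m (j - 1)
      rw [show j - 1 + 1 = j by omega] at hT
      rcases le_or_gt m j with hmj | hmj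
      · rw [if_pos (by omega : (m : Int) ≤ (j : Int))]
        have e2 : PySem.List.pyGetD ((List.range (j + 1)).map (bfun m)) ((j : Int) - (m : Int)) 0
            = bfun m (j - m) := by
          rw [show (j : Int) - (m : Int) = ((j - m : Nat) : Int) by omega,
            PySem.List.pyGetD_natCast]
          rw [List.getD_eq_getElem?_getD]
          simp [(by omega : j - m < j + 1)]
        rw [e2]
        rw [if_pos (⟨by omega, by omega⟩ : 0 < m ∧ m ≤ j)] at hT
        rw [show j + 1 - 1 = j by omega]
        simp only [Prod.mk.injEq, true_and]
        omega
      · rw [if_neg (by omega : ¬ (m : Int) ≤ (j : Int))]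
        rw [if_neg (by omega : ¬ (0 < m ∧ m ≤ j))] at hT
        rw [show j + 1 - 1 = j by omega]
        simp only [Prod.mk.injEq, true_and]
        omega

theorem main_eq (m : Nat) (hm : 2 ≤ m) (j : Nat) (hj : 2 ≤ j) :
    mortal_fibonacci (j : Int) (m : Int) = mortal_fibonacci_alt (j : Int) (m : Int) := by
  unfold mortal_fibonacci mortal_fibonacci_alt
  dsimp only
  rw [A_loop m hm j hj,
    if_neg (by omega : ¬ (j : Int) ≤ 1), if_neg (by omega : ¬ (m : Int) ≤ 0),
    B_loop m (by omega) j (by omega)]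
  have hne : (List.range j).map (Tfun m) ≠ [] := by simp; omega
  rw [PySem.List.pyGetD_neg_one _ 0 hne, List.getLast_eq_getElem]
  simp

-- ===== VERDICT (by name: the statement is the Claim_ definition above) =====
-- lifetime 1: from month 2 on the births and the living total are both 0
theorem Tfun_one (t : Nat) (ht : 1 ≤ t) : Tfun 1 t = 0 ∧ bfun 1 t = 0 := by
  induction t, ht using Nat.le_induction with
  | base =>
      have hb0 : bfun 1 0 = 1 := by simp [bfun, pvS]
      have hT0 : Tfun 1 0 = 1 := by simp [Tfun, pvS]
      have hb1 := bfun_succ 1 0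
      have hT1 := Tfun_succ 1 0
      rw [if_pos (by omega : 0 < 1 ∧ 1 ≤ 0 + 1)] at hT1
      simp only [Nat.zero_add, Nat.sub_self] at hb1 hT1
      omega
  | succ t ht2 ih =>
      have hb := bfun_succ 1 t
      have hT := Tfun_succ 1 t
      rw [if_pos (by omega : 0 < 1 ∧ 1 ≤ t + 1)] at hT
      rw [show t + 1 - 1 = t by omega] at hT
      omega

-- for -2 ≤ m ≤ 1, every branch of A appends another 1 to an all-ones list
theorem A_ones (m : Int) (hm : -2 ≤ m) (hm' : m ≤ 1) (j : Nat) (hj : 2 ≤ j) :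
    (PySem.List.pyRange 2 (j : Int) 1).foldl (pvStepA m) [1, 1]
      = List.replicate j 1 := by
  induction j, hj using Nat.le_induction with
  | base =>
      rw [PySem.List.pyRange_one_eq_nil (by norm_num)]
      rfl
  | succ j hj2 ih =>
      have hc : ((j + 1 : Nat) : Int) = (j : Int) + 1 := by push_cast; ring
      rw [hc, PySem.List.pyRange_one_succ_right (by omega : (2 : Int) ≤ (j : Int)),
        List.foldl_append, List.foldl_cons, List.foldl_nil, ih]
      have hget : ∀ i : Int, -(j : Int) ≤ i → i < (j : Int) →
          PySem.List.pyGetD (List.replicate j (1 : Int)) i 0 = 1 := by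
        intro i hi1 hi2
        have hin : PySem.Raise.InRange (List.replicate j (1 : Int)).length i := by
          simp [PySem.Raise.InRange]
          omega
        exact List.eq_of_mem_replicate (PySem.List.pyGetD_mem _ 0 hin)
      rw [List.replicate_succ']
      unfold pvStepA
      split_ifs with h1 h2
      · omega
      · rw [hget (-1) (by omega) (by omega), hget (-2) (by omega) (by omega)]
        norm_num
      · rw [hget (-1) (by omega) (by omega), hget (-2) (by omega) (by omega),
          hget (-(m + 1)) (by omega) (by omega)]
        norm_num

theorem mortal_fibonacci_spec : Claim_unchanged_mortal_fibonacci := by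
  intro n m hdom hpre
  unfold Spec_mortal_fibonacci
  intro hnd
  unfold D_mortal_fibonacci at hnd
  unfold Pre_mortal_fibonacci at hpre
  by_cases hn : n ≤ 1
  · unfold mortal_fibonacci mortal_fibonacci_alt
    dsimp only
    rw [PySem.List.pyRange_one_eq_nil (by omega : n ≤ 2), if_pos hn]
    simp only [List.foldl_nil]
    decide
  · have hm2 : 2 ≤ m := by omega
    obtain ⟨j, rfl⟩ : ∃ j : Nat, n = (j : Int) := ⟨n.toNat, by omega⟩
    obtain ⟨M, rfl⟩ : ∃ M : Nat, m = (M : Int) := ⟨m.toNat, by omega⟩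
    exact main_eq M (by omega) j (by omega)

theorem mortal_fibonacci_changed : Claim_changed_mortal_fibonacci := by
  unfold Claim_changed_mortal_fibonacci; decide

theorem mortal_fibonacci_tight : Claim_exact_mortal_fibonacci := by
  intro n m hdom hpre hd
  unfold D_mortal_fibonacci at hd
  unfold Pre_mortal_fibonacci at hpre
  have hB : mortal_fibonacci_alt n m = 0 := by
    unfold mortal_fibonacci_alt
    rw [if_neg (by omega : ¬ n ≤ 1)]
    rcases le_or_gt m 0 with hm0 | hm0
    · rw [if_pos hm0]
    · have hm1 : m = 1 := by omega
      subst hm1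
      rw [if_neg (by omega : ¬ (1 : Int) ≤ 0)]
      obtain ⟨j, rfl⟩ : ∃ j : Nat, n = (j : Int) := ⟨n.toNat, by omega⟩
      have hL := B_loop 1 (by omega) j (by omega)
      norm_num at hL
      rw [hL]
      exact (Tfun_one (j - 1) (by omega)).1
  have hA : mortal_fibonacci n m = 1 := by
    rcases le_or_gt (-2) m with hm | hm
    · obtain ⟨j, rfl⟩ : ∃ j : Nat, n = (j : Int) := ⟨n.toNat, by omega⟩
      unfold mortal_fibonacci
      dsimp only
      rw [A_ones m hm (by omega) j (by omega)]
      have hne : List.replicate j (1 : Int) ≠ [] := by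
        simp; omega
      rw [PySem.List.pyGetD_neg_one _ 0 hne]
      exact List.getLast_replicate ..
    · have hn2 : n = 2 := by omega
      subst hn2
      unfold mortal_fibonacci
      dsimp only
      rw [PySem.List.pyRange_one_eq_nil (by norm_num)]
      rfl
  rw [hA, hB]
  norm_num

theorem mortal_fibonacci_raises : Claim_raises_mortal_fibonacci := by
  unfold Claim_raises_mortal_fibonacci
  exact ⟨by intro n m _ hr; unfold Raises_mortal_fibonacci Pre_mortal_fibonacci at *; omega, by decide⟩

-- self-check: B's value at the raise witness, read off the raises theorem
theorem pvRaiseValue_ok : mortal_fibonacci_alt 3 (-3) = 0 := mortal_fibonacci_raises.2.2.2
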